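-- pv_equiv track=rewrite | github.com/ryann-with-2ns/ITM | ROXAS_Set 4.py | telephone_cipher
-- ===== SOURCE A (Python) =====
-- def telephone_cipher(message):
--     encoder_dict = {
--         " ":"0",
--         "A":"2",
--         "B":"22",
--         "C":"222",
--         "D":"3",
--         "E":"33",
--         "F":"333",
--         "G":"4",
--         "H":"44",
--         "I":"444",
--         "J":"5",
--         "K":"55",
--         "L":"555",
--         "M":"6",
--         "N":"66",
--         "O":"666",
--         "P":"7",
--         "Q":"77",
--         "R":"777",
--         "S":"7777",
--         "T":"8",
--         "U":"88",
--         "V":"888",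
--         "W":"9",
--         "X":"99",
--         "Y":"999",
--         "Z":"9999"
--     }
--     index_telephone_cipher = 0
--     numerical_string = ""
--     while index_telephone_cipher <= len(message) - 1:
--         if index_telephone_cipher == 0:
--             numerical_string += encoder_dict[message[index_telephone_cipher]]
--         else:
--             if encoder_dict[message[index_telephone_cipher]][0] == encoder_dict[message[index_telephone_cipher - 1]][0]:
--                 numerical_string += "_" + encoder_dict[message[index_telephone_cipher]]
--             else:
--                 numerical_string += encoder_dict[message[index_telephone_cipher]]
--         index_telephone_cipher += 1
--     return numerical_string
-- ===== SOURCE B (Python) =====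
-- def _code(c):
--     if c == " ":
--         return "0"
--     if not "A" <= c <= "Z":
--         raise KeyError(c)
--     k = ord(c) - 65
--     if k < 19:                      # A..S (S is the 4th letter on key 7)
--         d, p = (5, 3) if k == 18 else divmod(k, 3)
--         return str(2 + d) * (p + 1)
--     if k < 22:                      # T..V
--         return "8" * (k - 18)
--     return "9" * (k - 21)           # W..Z
--
--
-- def telephone_cipher(message):
--     codes = [_code(c) for c in message]
--     out = []
--     i = 0
--     n = len(codes)
--     while i < n:
--         j = i + 1
--         while j < n and codes[j][0] == codes[i][0]:
--             j += 1
--         out.append("_".join(codes[i:j]))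
--         i = j
--     return "".join(out)
-- ===== Notes on version B (the rewrite author's own statement) =====
-- stated objective: alternative
-- what changed: B splits the message into maximal runs of same-digit characters (nested run-extent scan) and emits each run's codes joined by the underscore separator, with the per-character code computed by closed-form keypad arithmetic on ord(c) instead of A's literal dict; A instead does one fused per-index loop appending the separator on a prev-lookup comparison.
import Mathlib
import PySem

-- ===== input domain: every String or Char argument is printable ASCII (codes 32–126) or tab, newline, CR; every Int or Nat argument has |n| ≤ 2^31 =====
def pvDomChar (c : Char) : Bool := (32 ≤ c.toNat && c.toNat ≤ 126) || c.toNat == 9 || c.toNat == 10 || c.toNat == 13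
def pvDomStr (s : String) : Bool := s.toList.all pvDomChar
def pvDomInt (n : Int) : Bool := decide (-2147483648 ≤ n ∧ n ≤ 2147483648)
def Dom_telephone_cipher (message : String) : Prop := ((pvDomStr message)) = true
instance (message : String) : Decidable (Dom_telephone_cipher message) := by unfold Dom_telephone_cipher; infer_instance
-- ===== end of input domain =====

-- B groups the message into maximal same-digit runs (closed-form keypad arithmetic,
-- nested run scan, underscore-join within each run) instead of A's fused per-index loop
-- with a prev-lookup separator branch (objective: alternative).


-- ===== PORT A =====
-- encoder_dict; codes kept as List Char (string facts are proved on the list side)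
def pvEncA : PySem.Dict Char (List Char) :=
  PySem.Dict.ofList [(' ', ['0']),
    ('A', ['2']), ('B', ['2','2']), ('C', ['2','2','2']),
    ('D', ['3']), ('E', ['3','3']), ('F', ['3','3','3']),
    ('G', ['4']), ('H', ['4','4']), ('I', ['4','4','4']),
    ('J', ['5']), ('K', ['5','5']), ('L', ['5','5','5']),
    ('M', ['6']), ('N', ['6','6']), ('O', ['6','6','6']),
    ('P', ['7']), ('Q', ['7','7']), ('R', ['7','7','7']), ('S', ['7','7','7','7']),
    ('T', ['8']), ('U', ['8','8']), ('V', ['8','8','8']),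
    ('W', ['9']), ('X', ['9','9']), ('Y', ['9','9','9']), ('Z', ['9','9','9','9'])]

-- encoder_dict[c]; KeyError (= default here) is excluded by Pre_
def pvCodeA (c : Char) : List Char := pvEncA.getD c []

-- the while loop: i counts up, fuel = remaining iterations, acc = numerical_string
def pvA_go (msg : List Char) (i : Nat) (fuel : Nat) (acc : List Char) : List Char :=
  match fuel with
  | 0 => acc
  | fuel + 1 =>
    if i = 0 then
      pvA_go msg (i + 1) fuel (acc ++ pvCodeA (msg.getD i ' '))
    else if (pvCodeA (msg.getD i ' ')).headD ' ' = (pvCodeA (msg.getD (i - 1) ' ')).headD ' ' then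
      pvA_go msg (i + 1) fuel (acc ++ '_' :: pvCodeA (msg.getD i ' '))
    else
      pvA_go msg (i + 1) fuel (acc ++ pvCodeA (msg.getD i ' '))

def telephone_cipher (message : String) : String :=
  String.ofList (pvA_go message.toList 0 message.toList.length [])

-- ===== PORT B =====
-- _code: closed-form keypad arithmetic on k = ord(c) - 65 (no table).
-- str(2+d)*(p+1) / "8"*(k-18) / "9"*(k-21): Python string repetition with a possibly
-- negative count gives "", matched exactly by Int.toNat (clamps negatives to 0).
def pvCodeB (c : Char) : List Char :=
  if c = ' ' then ['0']
  else if ¬ ('A' ≤ c ∧ c ≤ 'Z') then []   -- Python raises KeyError here; excluded by Pre_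
  else
    let k : Int := (c.toNat : Int) - 65
    if k < 19 then
      let dp := if k = 18 then ((5 : Int), (3 : Int)) else (PySem.Int.floordiv k 3, PySem.Int.mod k 3)
      (List.replicate (dp.2 + 1).toNat (PySem.Int.toStr (2 + dp.1)).toList).flatten
    else if k < 22 then List.replicate (k - 18).toNat '8'
    else List.replicate (k - 21).toNat '9'

-- outer while: peel off one maximal run; inner while (j advancing while
-- codes[j][0] == codes[i][0]) is the takeWhile/dropWhile split of the rest;
-- out.append of the joined run is the intercalate.
def pvChunksB : List (List Char) → List (List Char)
  | [] => []
  | c :: rest =>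
    List.intercalate ['_'] (c :: rest.takeWhile (fun x => x.headD ' ' == c.headD ' ')) ::
      pvChunksB (rest.dropWhile (fun x => x.headD ' ' == c.headD ' '))
termination_by l => l.length
decreasing_by
  simpa using Nat.lt_succ_of_le (List.length_dropWhile_le _ _)

def telephone_cipher_alt (message : String) : String :=
  String.ofList (pvChunksB (message.toList.map pvCodeB)).flatten

-- ===== PRECONDITION & SPEC =====
-- Pre_ excludes exactly the inputs on which A raises KeyError: any character other
-- than space or an uppercase letter (lowercase, digits, punctuation, tab/newline).
def pvCharOK (c : Char) : Bool := c.toNat == 32 || (65 ≤ c.toNat && c.toNat ≤ 90)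

def Pre_telephone_cipher (message : String) : Prop :=
  message.toList.all pvCharOK = true
instance (message : String) : Decidable (Pre_telephone_cipher message) := by
  unfold Pre_telephone_cipher; infer_instance

def pvWitness_telephone_cipher : String := "HA"

def Spec_telephone_cipher (message : String) (out : String) : Prop := out = telephone_cipher_alt message
instance (message : String) (out : String) : Decidable (Spec_telephone_cipher message out) := by unfold Spec_telephone_cipher; infer_instance

-- ===== CLAIM (what is proved, stated in full; the proofs are below) =====
def Claim_equal_telephone_cipher : Prop := ∀ (message : String), Dom_telephone_cipher message → Pre_telephone_cipher message → Spec_telephone_cipher message (telephone_cipher message)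

-- ===== LEMMAS AND PROOFS =====
def pvAllowed : List Char := [' ', 'A', 'B', 'C', 'D', 'E', 'F', 'G', 'H', 'I', 'J', 'K', 'L', 'M', 'N', 'O', 'P', 'Q', 'R', 'S', 'T', 'U', 'V', 'W', 'X', 'Y', 'Z']

-- the two per-character encoders agree on every admitted character (27 cases, by evaluation)
theorem pvCode_eq_bool : pvAllowed.all (fun c => pvCodeA c == pvCodeB c) = true := by decide

theorem pvCharOK_mem (c : Char) (h : pvCharOK c = true) : c ∈ pvAllowed := by
  have hc : Char.ofNat c.toNat = c := Char.ofNat_toNat c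
  unfold pvCharOK at h
  simp only [Bool.or_eq_true, Bool.and_eq_true, beq_iff_eq, decide_eq_true_eq] at h
  obtain ⟨n, hn⟩ : ∃ n, c.toNat = n := ⟨_, rfl⟩
  rw [hn] at h
  rw [← hc, hn]
  rcases h with h | ⟨h1, h2⟩
  · subst h; decide
  · interval_cases n <;> decide

theorem pvCode_eq (c : Char) (h : pvCharOK c = true) : pvCodeA c = pvCodeB c :=
  eq_of_beq (List.all_eq_true.mp pvCode_eq_bool c (pvCharOK_mem c h))

-- proof-side characterisation: the pairwise rendering of a code list
def pvJoinP : List Char → List (List Char) → List Char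
  | _, [] => []
  | prev, cur :: rest =>
    (if prev.headD ' ' = cur.headD ' ' then '_' :: cur else cur) ++ pvJoinP cur rest

def pvRender : List (List Char) → List Char
  | [] => []
  | c :: rest => c ++ pvJoinP c rest

-- A side: loop invariant — from index i ≥ 1 on, A's loop appends the pairwise rendering
theorem pvA_go_eq (msg : List Char) :
    ∀ (fuel i : Nat) (acc : List Char), 0 < i → i + fuel = msg.length →
      pvA_go msg i fuel acc =
        acc ++ pvJoinP (pvCodeA (msg.getD (i - 1) ' ')) ((msg.drop i).map pvCodeA) := by
  intro fuel
  induction fuel with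
  | zero =>
    intro i acc _ h
    have : msg.drop i = [] := List.drop_eq_nil_of_le (by omega)
    simp [pvA_go, this, pvJoinP]
  | succ n ih =>
    intro i acc hi h
    have hlt : i < msg.length := by omega
    have hdrop : msg.drop i = msg[i] :: msg.drop (i + 1) := List.drop_eq_getElem_cons hlt
    have hget : msg.getD i ' ' = msg[i] := List.getD_eq_getElem msg ' ' hlt
    rw [pvA_go, if_neg (by omega : ¬ i = 0), hget, hdrop, List.map_cons, pvJoinP]
    by_cases hh : (pvCodeA msg[i]).headD ' ' = (pvCodeA (msg.getD (i - 1) ' ')).headD ' '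
    · rw [if_pos hh, ih (i + 1) _ (by omega) (by omega), Nat.add_sub_cancel, hget,
        if_pos hh.symm, List.append_assoc]
    · rw [if_neg hh, ih (i + 1) _ (by omega) (by omega), Nat.add_sub_cancel, hget,
        if_neg (Ne.symm hh), List.append_assoc]

theorem telephone_cipher_eq_render (message : String) :
    telephone_cipher message = String.ofList (pvRender (message.toList.map pvCodeA)) := by
  unfold telephone_cipher
  cases hmsg : message.toList with
  | nil => rfl
  | cons c0 rest =>
    simp only [List.map_cons, List.length_cons, pvRender]
    rw [pvA_go, if_pos rfl,
      pvA_go_eq (c0 :: rest) rest.length 1 _ (by omega) (by simp [Nat.add_comm])]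
    simp

-- B side lemmas
theorem intercalate_underscore (c : List Char) (run : List (List Char)) :
    List.intercalate ['_'] (c :: run) = c ++ (run.map (fun x => '_' :: x)).flatten := by
  induction run generalizing c with
  | nil => simp [List.intercalate]
  | cons x xs ih =>
    have h2 : List.intersperse ['_'] (c :: x :: xs) =
        c :: ['_'] :: List.intersperse ['_'] (x :: xs) := by simp [List.intersperse]
    calc List.intercalate ['_'] (c :: x :: xs)
        = c ++ '_' :: List.intercalate ['_'] (x :: xs) := by
          simp [List.intercalate, h2]
      _ = c ++ (List.map (fun x => '_' :: x) (x :: xs)).flatten := by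
          rw [ih x]; simp

theorem pvJoinP_run (d : Char) :
    ∀ (run rest : List (List Char)) (prev : List Char), prev.headD ' ' = d →
      (∀ x ∈ run, x.headD ' ' = d) →
      ∃ q : List Char, q.headD ' ' = d ∧
        pvJoinP prev (run ++ rest) = (run.map (fun x => '_' :: x)).flatten ++ pvJoinP q rest := by
  intro run
  induction run with
  | nil => intro rest prev hprev _; exact ⟨prev, hprev, by simp⟩
  | cons x xs ih =>
    intro rest prev hprev hall
    have hx : x.headD ' ' = d := hall x (by simp)
    obtain ⟨q, hq, heq⟩ := ih rest x hx (fun y hy => hall y (by simp [hy]))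
    have hif : prev.headD ' ' = x.headD ' ' := by rw [hprev, hx]
    refine ⟨q, hq, ?_⟩
    rw [List.cons_append, pvJoinP, if_pos hif, heq]
    simp [List.append_assoc]

theorem dropWhile_head_false {α : Type} (p : α → Bool) :
    ∀ (l : List α) (x : α) (xs : List α), l.dropWhile p = x :: xs → p x = false := by
  intro l
  induction l with
  | nil => intro x xs h; simp [List.dropWhile] at h
  | cons a as ih =>
    intro x xs h
    by_cases hp : p a = true
    · rw [List.dropWhile_cons, if_pos hp] at h; exact ih x xs h
    · rw [List.dropWhile_cons, if_neg hp] at h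
      cases h; simpa using hp

theorem pvChunksB_flatten : ∀ (codes : List (List Char)),
    (pvChunksB codes).flatten = pvRender codes := by
  intro codes
  induction hn : codes.length using Nat.strong_induction_on generalizing codes with
  | _ n ih =>
  cases codes with
  | nil => simp [pvChunksB, pvRender]
  | cons c rest =>
    subst hn
    have hall : ∀ x ∈ rest.takeWhile (fun x => x.headD ' ' == c.headD ' '),
        x.headD ' ' = c.headD ' ' := by
      intro x hx; simpa using List.mem_takeWhile_imp hx
    obtain ⟨q, hq, heq⟩ := pvJoinP_run (c.headD ' ') _
      (rest.dropWhile (fun x => x.headD ' ' == c.headD ' ')) c rfl hall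
    rw [List.takeWhile_append_dropWhile] at heq
    have hih := ih (rest.dropWhile (fun x => x.headD ' ' == c.headD ' ')).length
      (by simpa using Nat.lt_succ_of_le (List.length_dropWhile_le _ rest)) _ rfl
    rw [pvChunksB, List.flatten_cons, hih, intercalate_underscore, pvRender, heq]
    cases hdw : rest.dropWhile (fun x => x.headD ' ' == c.headD ' ') with
    | nil => simp [pvRender, pvJoinP]
    | cons c' r =>
      have hc' : ¬ q.headD ' ' = (c').headD ' ' := by
        have hb := dropWhile_head_false _ _ _ _ hdw
        rw [hq]; intro h; rw [h] at hb; simp at hb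
      rw [pvRender, pvJoinP, if_neg hc']
      simp [List.append_assoc]

-- verdict
theorem telephone_cipher_spec : Claim_equal_telephone_cipher := by
  intro message _ hpre
  unfold Spec_telephone_cipher telephone_cipher_alt
  rw [telephone_cipher_eq_render message, pvChunksB_flatten]
  have hmap : message.toList.map pvCodeB = message.toList.map pvCodeA :=
    List.map_congr_left (fun c hc => (pvCode_eq c (List.all_eq_true.mp hpre c hc)).symm)
  rw [hmap]
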